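-- pv_equiv track=rewrite | github.com/1SerhiiDenysiuk/algo | lab3/lab3.py | dfs
-- ===== SOURCE A (Python) =====
-- def dfs(list_pairs, one_tribe, i):
--     j = 0
--     while j < len(list_pairs):
--         if (list_pairs[j][0] == i):
--             person = list_pairs[j][1]
--             devide_sex(one_tribe, person)
--             list_pairs.pop(j)
--             dfs(list_pairs, one_tribe, person)
--             j = 0
--         else:
--             j += 1
--     return one_tribe
--
-- def devide_sex(one_tribe, person):
--     if (person % 2 == 0):
--         one_tribe[0].append(person)
--     else:
--         one_tribe[1].append(person)
-- ===== SOURCE B (Python) =====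
-- def dfs(list_pairs, one_tribe, i):
--     adj = {}
--     for s, t in list_pairs:
--         adj.setdefault(s, []).append(t)
--
--     def visit(u):
--         while adj.get(u):
--             person = adj[u].pop(0)
--             one_tribe[person % 2].append(person)
--             visit(person)
--
--     visit(i)
--     return one_tribe
-- ===== Notes on version B (the rewrite author's own statement) =====
-- stated objective: faster
-- what changed: B builds an adjacency dict (source -> ordered target list) once and the DFS pops the next target of the current node in O(1), instead of A's rescan of the whole pair list from index 0 after every visit with an O(n) list.pop(j); return-value equivalence only: A empties consumed pairs out of list_pairs in place, B leaves list_pairs untouched (both append to one_tribe identically).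
-- outside the precondition, e.g. on dfs([(0, 2)], [[]], 0): A returns [[2]], B returns [[2]]
import Mathlib
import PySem

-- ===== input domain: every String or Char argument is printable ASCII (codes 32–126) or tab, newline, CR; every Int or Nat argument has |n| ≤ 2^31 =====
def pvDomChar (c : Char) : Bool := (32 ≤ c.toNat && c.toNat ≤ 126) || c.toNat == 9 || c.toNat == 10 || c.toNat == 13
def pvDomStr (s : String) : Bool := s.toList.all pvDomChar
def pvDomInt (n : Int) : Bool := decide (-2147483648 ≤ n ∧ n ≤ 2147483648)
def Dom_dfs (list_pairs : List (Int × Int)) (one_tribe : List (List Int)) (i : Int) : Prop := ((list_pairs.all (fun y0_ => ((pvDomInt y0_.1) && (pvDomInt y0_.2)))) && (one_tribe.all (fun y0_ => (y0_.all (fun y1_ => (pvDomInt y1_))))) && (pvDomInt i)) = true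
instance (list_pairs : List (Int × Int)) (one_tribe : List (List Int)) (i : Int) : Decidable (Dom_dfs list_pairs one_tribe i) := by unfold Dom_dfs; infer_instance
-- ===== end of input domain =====

-- B replaces A's repeated scan-from-0 + list.pop(j) over list_pairs by an adjacency dict built
-- once (source -> targets in original order) whose per-source head is popped in O(1); asymptotically
-- faster. Return-value equivalence only: A also empties the consumed pairs out of list_pairs in
-- place while B leaves list_pairs untouched (both append to one_tribe's sublists identically).

-- ===== PORT A =====
-- devide_sex: append person to one_tribe[0] (even) or one_tribe[1] (odd)
def devideSex (one_tribe : List (List Int)) (person : Int) : List (List Int) :=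
  if PySem.Int.mod person 2 == 0 then one_tribe.modify 0 (fun l => l ++ [person])
  else one_tribe.modify 1 (fun l => l ++ [person])

-- the while loop's scan: first pair with source i, returned together with the list it was popped from
def popFirst (i : Int) : List (Int × Int) → Option (Int × List (Int × Int))
  | [] => none
  | (s, t) :: rest =>
    if s == i then some (t, rest)
    else (popFirst i rest).map (fun r => (r.1, (s, t) :: r.2))

-- state = (list_pairs, one_tribe); fuel = list_pairs.length + 1 is exact: every round of the
-- while loop that matches consumes one pair, so lengths bound the recursion (fuel only totalises)
def dfsAux : Nat → List (Int × Int) → List (List Int) → Int → (List (Int × Int) × List (List Int))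
  | 0, lp, ot, _ => (lp, ot)
  | fuel + 1, lp, ot, i =>
    match popFirst i lp with
    | none => (lp, ot)
    | some (person, lp1) =>
      let st := dfsAux fuel lp1 (devideSex ot person) person   -- recursive dfs call
      dfsAux fuel st.1 st.2 i                                  -- j = 0 : restart the while loop

def dfs (list_pairs : List (Int × Int)) (one_tribe : List (List Int)) (i : Int) : List (List Int) :=
  (dfsAux (list_pairs.length + 1) list_pairs one_tribe i).2

-- ===== PORT B =====
-- visit(u): while adj.get(u): person = adj[u].pop(0); one_tribe[person % 2].append(person); visit(person)
def visitAux : Nat → PySem.Dict Int (List Int) → List (List Int) → Int → (PySem.Dict Int (List Int) × List (List Int))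
  | 0, adj, ot, _ => (adj, ot)
  | fuel + 1, adj, ot, u =>
    match adj.getD u [] with
    | [] => (adj, ot)
    | person :: rest =>
      let st := visitAux fuel (adj.insert u rest)
                  (ot.modify (PySem.Int.mod person 2).toNat (fun l => l ++ [person])) person
      visitAux fuel st.1 st.2 u

def dfs_alt (list_pairs : List (Int × Int)) (one_tribe : List (List Int)) (i : Int) : List (List Int) :=
  -- adj.setdefault(s, []).append(t) over the pairs = Dict.modify s [] (· ++ [t])
  let adj := list_pairs.foldl (fun d p => d.modify p.1 [] (fun l => l ++ [p.2])) PySem.Dict.empty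
  (visitAux (list_pairs.length + 1) adj one_tribe i).2

-- ===== PRECONDITION & SPEC =====
-- Pre_ excludes inputs where one_tribe has fewer than two sublists while some pair's source equals i:
-- there Python A (and B alike) may hit one_tribe[0]/one_tribe[1] with an IndexError depending on the
-- parities of the visited persons (it still returns when every visited person happens to be even).
def Pre_dfs (list_pairs : List (Int × Int)) (one_tribe : List (List Int)) (i : Int) : Prop :=
  2 ≤ one_tribe.length ∨ ∀ p ∈ list_pairs, p.1 ≠ i
instance (list_pairs : List (Int × Int)) (one_tribe : List (List Int)) (i : Int) : Decidable (Pre_dfs list_pairs one_tribe i) := by unfold Pre_dfs; infer_instance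

def pvWitness_dfs : (List (Int × Int)) × List (List Int) × Int := ([(1, 2), (2, 3)], [[], []], 1)

def Spec_dfs (list_pairs : List (Int × Int)) (one_tribe : List (List Int)) (i : Int) (out : List (List Int)) : Prop := out = dfs_alt list_pairs one_tribe i
instance (list_pairs : List (Int × Int)) (one_tribe : List (List Int)) (i : Int) (out : List (List Int)) : Decidable (Spec_dfs list_pairs one_tribe i out) := by unfold Spec_dfs; infer_instance

-- ===== CLAIM (what is proved, stated in full; the proofs are below) =====
def Claim_equal_dfs : Prop := ∀ (list_pairs : List (Int × Int)) (one_tribe : List (List Int)) (i : Int), Dom_dfs list_pairs one_tribe i → Pre_dfs list_pairs one_tribe i → Spec_dfs list_pairs one_tribe i (dfs list_pairs one_tribe i)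

-- ===== LEMMAS AND PROOFS =====

-- the targets of source s among the remaining pairs, in order
def adjTargets (lp : List (Int × Int)) (s : Int) : List Int :=
  (lp.filter (fun p => p.1 == s)).map Prod.snd

theorem popFirst_eq_none (i : Int) (lp : List (Int × Int)) :
    popFirst i lp = none ↔ adjTargets lp i = [] := by
  induction lp with
  | nil => simp [popFirst, adjTargets]
  | cons hd tl ih =>
    obtain ⟨s, t⟩ := hd
    by_cases h : s = i
    · simp [popFirst, adjTargets, h]
    · simpa [popFirst, adjTargets, h, Option.map_eq_none_iff] using ih

theorem popFirst_eq_some (i : Int) (lp : List (Int × Int)) (p : Int) (lp1 : List (Int × Int))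
    (h : popFirst i lp = some (p, lp1)) :
    adjTargets lp i = p :: adjTargets lp1 i ∧ ∀ s, s ≠ i → adjTargets lp1 s = adjTargets lp s := by
  induction lp generalizing lp1 with
  | nil => simp [popFirst] at h
  | cons hd tl ih =>
    obtain ⟨a, b⟩ := hd
    by_cases ha : a = i
    · subst ha
      simp [popFirst] at h
      obtain ⟨hp, hlp⟩ := h
      subst hp; subst hlp
      refine ⟨by simp [adjTargets], fun s hs => by simp [adjTargets, Ne.symm hs]⟩
    · have ha' : (a == i) = false := by simp [ha]
      simp only [popFirst, ha', Bool.false_eq_true, if_false, Option.map_eq_some_iff] at h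
      obtain ⟨⟨q, l⟩, hrec, heq⟩ := h
      injection heq with hq hl
      subst hq; subst hl
      obtain ⟨h1, h2⟩ := ih l hrec
      constructor
      · simpa [adjTargets, ha] using h1
      · intro s hs
        by_cases has : a = s
        · subst has
          simpa [adjTargets] using h2 a hs
        · simpa [adjTargets, has] using h2 s hs

theorem devideSex_eq (ot : List (List Int)) (p : Int) :
    devideSex ot p = ot.modify (PySem.Int.mod p 2).toNat (fun l => l ++ [p]) := by
  have h : PySem.Int.mod p 2 = 0 ∨ PySem.Int.mod p 2 = 1 := by
    have h0 : 0 ≤ PySem.Int.mod p 2 := by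
      simp only [PySem.Int.mod]; exact Int.fmod_nonneg_of_pos p (by norm_num)
    have h1 : PySem.Int.mod p 2 < 2 := by
      simp only [PySem.Int.mod]; exact Int.fmod_lt_of_pos p (by norm_num)
    omega
  rcases h with h | h <;> rw [devideSex, h] <;> norm_num

theorem visitAux_eq_dfsAux (fuel : Nat) :
    ∀ (lp : List (Int × Int)) (adj : PySem.Dict Int (List Int)) (ot : List (List Int)) (i : Int),
    (∀ s, adj.getD s [] = adjTargets lp s) →
    (visitAux fuel adj ot i).2 = (dfsAux fuel lp ot i).2 ∧
    ∀ s, (visitAux fuel adj ot i).1.getD s [] = adjTargets (dfsAux fuel lp ot i).1 s := by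
  induction fuel with
  | zero => intro lp adj ot i h; exact ⟨rfl, h⟩
  | succ fuel ih =>
    intro lp adj ot i h
    cases hpop : popFirst i lp with
    | none =>
      have hi : adj.getD i [] = [] := by rw [h i, (popFirst_eq_none i lp).mp hpop]
      simp only [visitAux, dfsAux, hpop, hi]
      exact ⟨trivial, h⟩
    | some r =>
      obtain ⟨p, lp1⟩ := r
      obtain ⟨h1, h2⟩ := popFirst_eq_some i lp p lp1 hpop
      have hi : adj.getD i [] = p :: adjTargets lp1 i := by rw [h i, h1]
      have hinv : ∀ s, (adj.insert i (adjTargets lp1 i)).getD s [] = adjTargets lp1 s := by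
        intro s
        rw [PySem.Dict.getD_insert]
        by_cases hs : s = i
        · simp [hs]
        · simp only [if_neg hs]
          rw [h s, h2 s hs]
      have step1 := ih lp1 (adj.insert i (adjTargets lp1 i)) (devideSex ot p) p hinv
      have step2 := ih (dfsAux fuel lp1 (devideSex ot p) p).1
        (visitAux fuel (adj.insert i (adjTargets lp1 i)) (devideSex ot p) p).1
        (dfsAux fuel lp1 (devideSex ot p) p).2 i step1.2
      simp only [visitAux, dfsAux, hpop, hi]
      rw [← devideSex_eq, step1.1]
      exact step2

-- ===== VERDICT (by name: the statement is the Claim_ definition above) =====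
theorem dfs_spec : Claim_equal_dfs := by
  intro lp ot i _ _
  unfold Spec_dfs dfs dfs_alt
  have hadj : ∀ s,
      (lp.foldl (fun d p => d.modify p.1 [] (fun l => l ++ [p.2])) PySem.Dict.empty).getD s []
        = adjTargets lp s := by
    intro s
    rw [PySem.Dict.getD_foldl_modify_append]
    simp [adjTargets]
  exact ((visitAux_eq_dfsAux (lp.length + 1) lp _ ot i hadj).1).symm
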